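-- pv_equiv track=rewrite | github.com/jcolinpatrick/kryptos | scripts/transposition/columnar/e_grid31_k4_transposition_02.py | myszkowski_encrypt
-- ===== SOURCE A (Python) =====
-- def myszkowski_encrypt(text, keyword):
--     """Myszkowski transposition: write text in rows of len(keyword).
--     Columns with duplicate keyword letters are read left-to-right simultaneously."""
--     width = len(keyword)
--     nrows = (len(text) + width - 1) // width
--     grid = {}
--     for i, ch in enumerate(text):
--         r, c = divmod(i, width)
--         grid[(r, c)] = ch
--
--     # Group columns by keyword letter
--     from collections import defaultdict
--     groups = defaultdict(list)
--     for i, ch in enumerate(keyword):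
--         groups[ch].append(i)
--
--     # Read in sorted key order
--     result = []
--     for key_letter in sorted(groups.keys()):
--         cols = groups[key_letter]
--         if len(cols) == 1:
--             for row in range(nrows):
--                 if (row, cols[0]) in grid:
--                     result.append(grid[(row, cols[0])])
--         else:
--             # Myszkowski: read row by row across all cols with same letter
--             for row in range(nrows):
--                 for col in cols:
--                     if (row, col) in grid:
--                         result.append(grid[(row, col)])
--     return ''.join(result)
-- ===== SOURCE B (Python) =====
-- def myszkowski_encrypt(text, keyword):
--     """Myszkowski transposition as a decorate-sort: position i of the text is read
--     in order of (its column's keyword letter, i) -- stable row-major order inside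
--     each letter group, letter groups in sorted order."""
--     width = len(keyword)
--     order = sorted(range(len(text)), key=lambda i: (keyword[i % width], i))
--     return ''.join(text[i] for i in order)
-- ===== Notes on version B (the rewrite author's own statement) =====
-- stated objective: alternative
-- what changed: B replaces A's grid dict, letter-grouping dict and per-group row/column loops by a decorate-sort: it sorts the text positions 0..n-1 by the key (keyword letter of the position's column, position) and reads the text in that order.
import Mathlib
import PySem

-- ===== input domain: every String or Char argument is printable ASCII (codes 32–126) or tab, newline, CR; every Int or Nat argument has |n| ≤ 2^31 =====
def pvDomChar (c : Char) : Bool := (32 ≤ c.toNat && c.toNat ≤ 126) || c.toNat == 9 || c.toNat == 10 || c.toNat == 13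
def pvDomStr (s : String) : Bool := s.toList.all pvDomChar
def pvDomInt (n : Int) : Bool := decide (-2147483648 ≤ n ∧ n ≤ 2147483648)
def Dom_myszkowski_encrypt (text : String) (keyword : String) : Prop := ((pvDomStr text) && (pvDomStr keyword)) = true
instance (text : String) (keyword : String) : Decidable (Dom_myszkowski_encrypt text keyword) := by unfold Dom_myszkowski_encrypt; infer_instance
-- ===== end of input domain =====

-- B replaces A's grid dict, grouping dict and per-group loops by a decorate-sort of the text
-- positions under the key (keyword letter of the position's column, position) — an alternative
-- algorithm of similar cost. Neither version mutates its arguments.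

-- ===== PORT A =====
def myszkowski_encrypt (text : String) (keyword : String) : String :=
  let width : Int := PySem.Str.len keyword
  let nrows : Int := PySem.Int.floordiv (PySem.Str.len text + width - 1) width
  let grid : PySem.Dict (Int × Int) Char :=
    (PySem.List.enumerate text.toList).foldl
      (fun d p => d.insert (PySem.Int.floordiv p.1 width, PySem.Int.mod p.1 width) p.2)
      PySem.Dict.empty
  let groups : PySem.Dict Char (List Int) :=
    (PySem.List.enumerate keyword.toList).foldl
      (fun d p => d.modify p.2 [] (fun l => l ++ [p.1])) PySem.Dict.empty
  let result : List Char :=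
    (PySem.List.sorted groups.keys (fun x => x) false).foldl (fun acc letter =>
      let cols := groups.getD letter []
      if cols.length == 1 then
        -- cols[0]: guarded by len(cols) == 1, so the default of pyGetD is never used
        (PySem.List.pyRange 0 nrows 1).foldl (fun acc row =>
          match grid.get? (row, PySem.List.pyGetD cols 0 0) with
          | some ch => acc ++ [ch]
          | none => acc) acc
      else
        (PySem.List.pyRange 0 nrows 1).foldl (fun acc row =>
          cols.foldl (fun acc col =>
            match grid.get? (row, col) with
            | some ch => acc ++ [ch]
            | none => acc) acc) acc) []
  String.ofList result

-- ===== PORT B =====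
def myszkowski_encrypt_alt (text : String) (keyword : String) : String :=
  let width : Int := PySem.Str.len keyword
  -- sorted(range(len(text)), key=lambda i: (keyword[i % width], i)) — tuple key via sorted2;
  -- keyword[i % width] is in range for every i drawn from range(len(text)) when width > 0,
  -- so the pyGetD default is never used
  let order : List Int :=
    PySem.List.sorted2 (PySem.List.pyRange 0 (PySem.Str.len text) 1)
      (fun i => PySem.List.pyGetD keyword.toList (PySem.Int.mod i width) ' ')
      (fun i => i) false
  -- ''.join(text[i] for i in order); every i comes from range(len(text)), so in range
  String.ofList (order.map (fun i => PySem.List.pyGetD text.toList i ' '))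

-- ===== PRECONDITION & SPEC =====
-- Pre_ excludes only the empty keyword, on which A raises ZeroDivisionError.
def Pre_myszkowski_encrypt (text : String) (keyword : String) : Prop := keyword ≠ ""
instance (text : String) (keyword : String) : Decidable (Pre_myszkowski_encrypt text keyword) := by unfold Pre_myszkowski_encrypt; infer_instance
def pvWitness_myszkowski_encrypt : String × String := ("attack at dawn", "tomato")

def Spec_myszkowski_encrypt (text : String) (keyword : String) (out : String) : Prop := out = myszkowski_encrypt_alt text keyword
instance (text : String) (keyword : String) (out : String) : Decidable (Spec_myszkowski_encrypt text keyword out) := by unfold Spec_myszkowski_encrypt; infer_instance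

-- ===== CLAIM (what is proved, stated in full; the proofs are below) =====
def Claim_equal_myszkowski_encrypt : Prop := ∀ (text : String) (keyword : String), Dom_myszkowski_encrypt text keyword → Pre_myszkowski_encrypt text keyword → Spec_myszkowski_encrypt text keyword (myszkowski_encrypt text keyword)

-- ===== LEMMAS AND PROOFS =====

-- ---- proof-side names for the pieces of A's computation ----

-- A's letter → column-indices grouping
def grpOf (kw : List Char) (L : Char) : List Int :=
  (((PySem.List.enumerate kw).foldl
    (fun (d : PySem.Dict Char (List Int)) p => d.modify p.2 [] (fun l => l ++ [p.1]))
    PySem.Dict.empty).getD L [])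

-- A's sorted list of distinct keyword letters
def lettersOf (kw : List Char) : List Char :=
  PySem.List.sorted (((PySem.List.enumerate kw).foldl
    (fun (d : PySem.Dict Char (List Int)) p => d.modify p.2 [] (fun l => l ++ [p.1]))
    PySem.Dict.empty).keys) (fun x => x) false

def nrowsOf (t kw : List Char) : Int :=
  PySem.Int.floordiv ((t.length : Int) + (kw.length : Int) - 1) (kw.length : Int)

-- the list of text positions in A's reading order
def idxList (t kw : List Char) : List Int :=
  (lettersOf kw).flatMap fun L =>
    (PySem.List.pyRange 0 (nrowsOf t kw) 1).flatMap fun row =>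
      (grpOf kw L).filterMap fun col =>
        if 0 ≤ row * (kw.length : Int) + col ∧ row * (kw.length : Int) + col < (t.length : Int)
        then some (row * (kw.length : Int) + col) else none

-- B's sort key, as a lexicographic pair
def lexKey (kw : List Char) (i : Int) : Char ×ₗ Int :=
  toLex (PySem.List.pyGetD kw (PySem.Int.mod i (kw.length : Int)) ' ', i)

-- sorted2 with second key the element itself IS sorted under the lexicographic pair key
theorem sorted2_eq_sorted_lex {κ : Type} [LinearOrder κ] (xs : List Int) (k1 : Int → κ) :
    PySem.List.sorted2 xs k1 (fun i => i) false
      = PySem.List.sorted xs (fun i => toLex (k1 i, i)) false := by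
  have hbe : (fun (a b : Int) => decide (k1 a < k1 b) || (!decide (k1 b < k1 a) && decide (a < b)))
      = (fun (a b : Int) => decide (toLex (k1 a, a) < toLex (k1 b, b))) := by
    funext a b
    rcases lt_trichotomy (k1 a) (k1 b) with h | h | h
    · simp [h, lt_asymm h, Prod.Lex.lt_iff]
    · simp [h, Prod.Lex.lt_iff]
    · simp [h, lt_asymm h, ne_of_gt h, Prod.Lex.lt_iff]
  rw [PySem.List.sorted_eq_foldl_insertBy]
  simp [PySem.List.sorted2, hbe]

theorem grp_repr (kw : List Char) (L : Char) :
    grpOf kw L = ((((PySem.List.enumerate kw).map (fun p => (p.2, p.1))).filter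
      (fun q => q.1 == L)).map (fun q => q.2)) := by
  unfold grpOf
  have hmap : (PySem.List.enumerate kw).foldl
      (fun (d : PySem.Dict Char (List Int)) p => d.modify p.2 [] (fun l => l ++ [p.1]))
      PySem.Dict.empty
      = ((PySem.List.enumerate kw).map (fun p => (p.2, p.1))).foldl
      (fun d q => d.modify q.1 [] (fun l => l ++ [q.2])) PySem.Dict.empty := by
    rw [List.foldl_map]
  rw [hmap, PySem.Dict.getD_foldl_modify_append, PySem.Dict.getD_empty, List.nil_append]

theorem mem_grp_iff (kw : List Char) (L : Char) (col : Int) :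
    col ∈ grpOf kw L ↔ ∃ (k : Nat) (hk : k < kw.length), col = (k : Int) ∧ kw[k] = L := by
  rw [grp_repr]
  simp only [List.mem_map, List.mem_filter, PySem.List.mem_enumerate_iff]
  constructor
  · rintro ⟨q, ⟨⟨p, ⟨k, hk, rfl⟩, rfl⟩, hql⟩, rfl⟩
    simp only [beq_iff_eq] at hql
    exact ⟨k, hk, by simp, hql⟩
  · rintro ⟨k, hk, rfl, hkL⟩
    exact ⟨(kw[k], (k : Int)), ⟨⟨((k : Int), kw[k]), ⟨k, hk, by simp⟩, rfl⟩, by simp [hkL]⟩, rfl⟩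

theorem grp_pairwise (kw : List Char) (L : Char) : (grpOf kw L).Pairwise (· < ·) := by
  rw [grp_repr, List.pairwise_map]
  apply List.Pairwise.filter
  rw [List.pairwise_map]
  exact PySem.List.pairwise_lt_enumerate kw 0

theorem grp_bounds (kw : List Char) (L : Char) (col : Int) (h : col ∈ grpOf kw L) :
    0 ≤ col ∧ col < (kw.length : Int) := by
  obtain ⟨k, hk, rfl, -⟩ := (mem_grp_iff kw L col).mp h
  constructor
  · exact Int.natCast_nonneg k
  · exact_mod_cast hk

theorem lettersOf_eq (kw : List Char) :
    lettersOf kw = PySem.List.sorted (PySem.Set.ofList kw) (fun x => x) false := by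
  unfold lettersOf
  congr 1
  rw [PySem.Dict.keys_foldl_modify_key (PySem.List.enumerate kw) (fun p => p.2) []
    (fun _ p => fun l => l ++ [p.1]) PySem.Dict.empty]
  rw [PySem.Dict.keys_empty, PySem.List.map_snd_enumerate, PySem.Set.update_nil_left]

theorem letters_pairwise (kw : List Char) : (lettersOf kw).Pairwise (· < ·) := by
  rw [lettersOf_eq]; exact PySem.List.sorted_ofList_pairwise_lt kw

theorem mem_letters (kw : List Char) (L : Char) : L ∈ lettersOf kw ↔ L ∈ kw := by
  rw [lettersOf_eq, PySem.List.mem_sorted, PySem.Set.mem_ofList]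

theorem grid_key_eq (s w r c : Int) (hw : 0 < w) (hc : 0 ≤ c) (hcw : c < w) :
    ((r, c) = ((PySem.Int.floordiv s w, PySem.Int.mod s w) : Int × Int)) ↔ r * w + c = s := by
  constructor
  · rintro h
    have h1 : r = PySem.Int.floordiv s w := (Prod.mk.injEq .. ▸ h).1
    have h2 : c = PySem.Int.mod s w := (Prod.mk.injEq .. ▸ h).2
    have := PySem.Int.floordiv_mul_add_mod s w
    rw [h1, h2]; linarith
  · intro h
    have hfd : PySem.Int.floordiv s w = r := by
      rw [PySem.Int.floordiv_eq_iff_of_pos hw]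
      constructor <;> nlinarith
    have h2 : r * w + PySem.Int.mod s w = s := by
      have := PySem.Int.floordiv_mul_add_mod s w
      rw [hfd] at this; exact this
    rw [Prod.mk.injEq, hfd]
    exact ⟨rfl, by omega⟩

theorem divmod_decomp (w row col : Int) (hw : 0 < w) (hc : 0 ≤ col) (hcw : col < w) :
    PySem.Int.floordiv (row * w + col) w = row ∧ PySem.Int.mod (row * w + col) w = col := by
  have h := (grid_key_eq (row * w + col) w row col hw hc hcw).mpr rfl
  rw [Prod.mk.injEq] at h
  exact ⟨h.1.symm, h.2.symm⟩

theorem kchar_block (kw : List Char) (L : Char) (row col : Int) (hw : 0 < (kw.length : Int))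
    (h : col ∈ grpOf kw L) :
    PySem.List.pyGetD kw (PySem.Int.mod (row * (kw.length : Int) + col) (kw.length : Int)) ' ' = L := by
  obtain ⟨k, hk, rfl, hkL⟩ := (mem_grp_iff kw L col).mp h
  rw [(divmod_decomp (kw.length : Int) row (k : Int) hw (Int.natCast_nonneg k) (by exact_mod_cast hk)).2]
  rw [PySem.List.pyGetD_eq_getElem kw ' ' (Int.natCast_nonneg k) (by exact_mod_cast hk)]
  simpa using hkL

-- n ≤ nrows * w (the grid has at least n cells)
theorem le_nrows_mul (t kw : List Char) (hw : 0 < (kw.length : Int)) :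
    (t.length : Int) ≤ nrowsOf t kw * (kw.length : Int) := by
  have h := (PySem.Int.floordiv_eq_iff_of_pos (a := (t.length : Int) + (kw.length : Int) - 1)
    (b := (kw.length : Int)) (q := nrowsOf t kw) hw).mp rfl
  have := h.2
  nlinarith [h.1, h.2]

theorem mem_idxList (t kw : List Char) (hw : 0 < (kw.length : Int)) (i : Int) :
    i ∈ idxList t kw ↔ 0 ≤ i ∧ i < (t.length : Int) := by
  unfold idxList
  simp only [List.mem_flatMap, List.mem_filterMap]
  constructor
  · rintro ⟨L, -, row, -, col, -, hif⟩
    split_ifs at hif with hc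
    cases hif
    exact hc
  · rintro ⟨h0, hn⟩
    have hm0 : 0 ≤ PySem.Int.mod i (kw.length : Int) := PySem.Int.mod_nonneg i hw
    have hmw : PySem.Int.mod i (kw.length : Int) < (kw.length : Int) := PySem.Int.mod_lt i hw
    have hmnat : (PySem.Int.mod i (kw.length : Int)).toNat < kw.length := by omega
    refine ⟨kw[(PySem.Int.mod i (kw.length : Int)).toNat], ?_,
      PySem.Int.floordiv i (kw.length : Int), ?_,
      PySem.Int.mod i (kw.length : Int), ?_, ?_⟩
    · rw [mem_letters]; exact List.getElem_mem hmnat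
    · rw [PySem.List.mem_pyRange_one]
      constructor
      · rw [PySem.Int.le_floordiv_iff_mul_le hw]; linarith
      · rw [PySem.Int.floordiv_lt_iff_lt_mul hw]
        exact lt_of_lt_of_le hn (le_nrows_mul t kw hw)
    · rw [mem_grp_iff]
      exact ⟨(PySem.Int.mod i (kw.length : Int)).toNat, hmnat, by omega, rfl⟩
    · have hdecomp := PySem.Int.floordiv_mul_add_mod i (kw.length : Int)
      rw [if_pos (by rw [hdecomp]; exact ⟨h0, hn⟩), hdecomp]

theorem pairwise_idxList (t kw : List Char) (hw : 0 < (kw.length : Int)) :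
    (idxList t kw).Pairwise (fun a b => lexKey kw a < lexKey kw b) := by
  unfold idxList
  -- characterise the elements of one (letter, row) block
  have hblock : ∀ (L : Char) (row j : Int),
      j ∈ (grpOf kw L).filterMap (fun col =>
        if 0 ≤ row * (kw.length : Int) + col ∧ row * (kw.length : Int) + col < (t.length : Int)
        then some (row * (kw.length : Int) + col) else none) →
      ∃ col ∈ grpOf kw L, j = row * (kw.length : Int) + col := by
    intro L row j hj
    obtain ⟨col, hcol, hif⟩ := List.mem_filterMap.mp hj
    split_ifs at hif with hc
    cases hif
    exact ⟨col, hcol, rfl⟩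
  rw [List.pairwise_flatMap]
  constructor
  · -- inside one letter: rows then columns, positions strictly increasing, same letter
    intro L hL
    rw [List.pairwise_flatMap]
    constructor
    · -- inside one row: columns strictly increasing
      intro row hrow
      rw [List.pairwise_filterMap]
      refine List.Pairwise.imp_of_mem ?_ (grp_pairwise kw L)
      intro c1 c2 hc1 hc2 hlt j1 hj1 j2 hj2
      split_ifs at hj1 hj2
      cases hj1
      cases hj2
      rw [Prod.Lex.lt_iff]
      simp only [lexKey, ofLex_toLex]
      right
      refine ⟨?_, by omega⟩
      rw [kchar_block kw L row c1 hw hc1, kchar_block kw L row c2 hw hc2]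
    · -- across rows of the same letter
      refine List.Pairwise.imp_of_mem ?_ (PySem.List.pairwise_lt_pyRange_one 0 (nrowsOf t kw))
      intro r1 r2 hm1 hm2 hlt j1 hj1 j2 hj2
      obtain ⟨c1, hc1, rfl⟩ := hblock L r1 j1 hj1
      obtain ⟨c2, hc2, rfl⟩ := hblock L r2 j2 hj2
      have hb1 := grp_bounds kw L c1 hc1
      have hb2 := grp_bounds kw L c2 hc2
      rw [Prod.Lex.lt_iff]
      simp only [lexKey, ofLex_toLex]
      right
      refine ⟨?_, by nlinarith [hb1.1, hb1.2, hb2.1, hb2.2]⟩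
      rw [kchar_block kw L r1 c1 hw hc1, kchar_block kw L r2 c2 hw hc2]
  · -- across letters: first key component strictly increases
    refine List.Pairwise.imp_of_mem ?_ (letters_pairwise kw)
    intro L1 L2 hm1 hm2 hlt j1 hj1 j2 hj2
    obtain ⟨r1, hr1m, hj1'⟩ := List.mem_flatMap.mp hj1
    obtain ⟨r2, hr2m, hj2'⟩ := List.mem_flatMap.mp hj2
    obtain ⟨c1, hc1, rfl⟩ := hblock L1 r1 j1 hj1'
    obtain ⟨c2, hc2, rfl⟩ := hblock L2 r2 j2 hj2'
    rw [Prod.Lex.lt_iff]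
    simp only [lexKey, ofLex_toLex]
    left
    rw [kchar_block kw L1 r1 c1 hw hc1, kchar_block kw L2 r2 c2 hw hc2]
    exact hlt

-- B's sort produces exactly A's reading order
theorem reading_order (t kw : List Char) (hw : 0 < (kw.length : Int)) :
    PySem.List.sorted (PySem.List.pyRange 0 (t.length : Int) 1) (lexKey kw) false = idxList t kw := by
  have hpw := pairwise_idxList t kw hw
  refine PySem.List.sorted_eq_of_perm_of_pairwise_lt _ _ _ ?_ hpw
  · have hnd : (idxList t kw).Nodup := by
      refine hpw.imp ?_
      intro a b h e
      subst e
      exact absurd h (lt_irrefl _)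
    rw [List.perm_ext_iff_of_nodup hnd (PySem.List.nodup_pyRange_one 0 _)]
    intro i
    rw [mem_idxList t kw hw, PySem.List.mem_pyRange_one]

theorem grid_get_aux (w r c : Int) (hw : 0 < w) (hc : 0 ≤ c) (hcw : c < w)
    (t : List Char) (s : Int) (d : PySem.Dict (Int × Int) Char) :
    ((PySem.List.enumerate t s).foldl
      (fun d p => d.insert (PySem.Int.floordiv p.1 w, PySem.Int.mod p.1 w) p.2) d).get? (r, c) =
    if s ≤ r * w + c ∧ r * w + c < s + t.length then t[(r * w + c - s).toNat]? else d.get? (r, c) := by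
  induction t generalizing s d with
  | nil =>
    have hno : ¬ (s ≤ r * w + c ∧ r * w + c < s + ([] : List Char).length) := by
      simp only [List.length_nil]; omega
    simp only [PySem.List.enumerate_nil, List.foldl_nil, if_neg hno]
  | cons x xs ih =>
    rw [PySem.List.enumerate_cons]
    simp only [List.foldl_cons]
    rw [ih (s + 1)]
    by_cases hidx : r * w + c = s
    · have hkey : ((r, c) : Int × Int) = (PySem.Int.floordiv s w, PySem.Int.mod s w) :=
        (grid_key_eq s w r c hw hc hcw).mpr hidx
      have hcond : s ≤ r * w + c ∧ r * w + c < s + ((x :: xs) : List Char).length := by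
        simp only [List.length_cons]; constructor <;> omega
      have hcond' : ¬ (s + 1 ≤ r * w + c ∧ r * w + c < s + 1 + xs.length) := by omega
      rw [if_neg hcond', if_pos hcond, hkey, PySem.Dict.get?_insert_self]
      have h0 : (r * w + c - s).toNat = 0 := by omega
      rw [h0]
      simp
    · have hne : ((r, c) : Int × Int) ≠ (PySem.Int.floordiv s w, PySem.Int.mod s w) := by
        intro h; exact hidx ((grid_key_eq s w r c hw hc hcw).mp h)
      rw [PySem.Dict.get?_insert_of_ne _ _ hne]
      by_cases hin : s + 1 ≤ r * w + c ∧ r * w + c < s + 1 + xs.length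
      · have hcond : s ≤ r * w + c ∧ r * w + c < s + ((x :: xs) : List Char).length := by
          simp only [List.length_cons]; constructor <;> omega
        rw [if_pos hin, if_pos hcond]
        have hsucc : (r * w + c - s).toNat = (r * w + c - (s + 1)).toNat + 1 := by omega
        rw [hsucc, List.getElem?_cons_succ]
      · have hcond : ¬ (s ≤ r * w + c ∧ r * w + c < s + ((x :: xs) : List Char).length) := by
          simp only [List.length_cons] at *
          push_cast at *
          omega
        rw [if_neg hin, if_neg hcond]

theorem matchOpt_append (acc : List Char) (o : Option Char) :
    (match o with | some ch => acc ++ [ch] | none => acc) = acc ++ o.toList := by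
  cases o <;> simp

-- A's per-letter body (either branch) is one append of a row-major flatMap
theorem branch_eq (g : Int → Int → Option Char) (cols : List Int) (nrows : Int) (acc : List Char) :
    (if cols.length == 1 then
        (PySem.List.pyRange 0 nrows 1).foldl (fun acc row =>
          match g row (PySem.List.pyGetD cols 0 0) with
          | some ch => acc ++ [ch] | none => acc) acc
      else
        (PySem.List.pyRange 0 nrows 1).foldl (fun acc row =>
          cols.foldl (fun acc col => match g row col with
            | some ch => acc ++ [ch] | none => acc) acc) acc)
    = acc ++ (PySem.List.pyRange 0 nrows 1).flatMap (fun row =>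
        cols.flatMap (fun col => (g row col).toList)) := by
  by_cases h1 : cols.length = 1
  · obtain ⟨c0, rfl⟩ : ∃ c0, cols = [c0] := by
      match cols, h1 with | [c0], _ => exact ⟨c0, rfl⟩
    rw [if_pos (by simp)]
    have hf : (fun (acc : List Char) (row : Int) =>
        (match g row (PySem.List.pyGetD [c0] 0 0) with
          | some ch => acc ++ [ch] | none => acc))
        = fun acc row => acc ++ ([c0].flatMap (fun col => (g row col).toList)) := by
      funext acc row
      rw [matchOpt_append, PySem.List.pyGetD_zero_cons]
      simp
    rw [hf, PySem.List.foldl_append_eq_flatMap]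
  · rw [if_neg (by simpa using h1)]
    have hf : (fun (acc : List Char) (row : Int) =>
        cols.foldl (fun acc col => match g row col with
          | some ch => acc ++ [ch] | none => acc) acc)
        = fun acc row => acc ++ cols.flatMap (fun col => (g row col).toList) := by
      funext acc row
      have hm : (fun (acc : List Char) (col : Int) =>
          (match g row col with | some ch => acc ++ [ch] | none => acc))
          = fun acc col => acc ++ (g row col).toList := by
        funext acc col; rw [matchOpt_append]
      rw [hm, PySem.List.foldl_append_eq_flatMap]
    rw [hf, PySem.List.foldl_append_eq_flatMap]

-- reading A's grid in A's order is reading the text at the positions of idxList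
theorem idxList_map_getter (t kw : List Char) (hw : 0 < (kw.length : Int)) :
    (lettersOf kw).flatMap (fun L =>
      (PySem.List.pyRange 0 (nrowsOf t kw) 1).flatMap (fun row =>
        (grpOf kw L).flatMap (fun col =>
          (((PySem.List.enumerate t).foldl
            (fun d p => d.insert (PySem.Int.floordiv p.1 (kw.length : Int),
              PySem.Int.mod p.1 (kw.length : Int)) p.2)
            PySem.Dict.empty).get? (row, col)).toList)))
    = (idxList t kw).map (fun i => PySem.List.pyGetD t i ' ') := by
  unfold idxList
  rw [List.map_flatMap]
  apply List.flatMap_congr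
  intro L hL
  rw [List.map_flatMap]
  apply List.flatMap_congr
  intro row hrow
  rw [List.map_filterMap, List.filterMap_eq_flatMap_toList]
  apply List.flatMap_congr
  intro col hcol
  have hb := grp_bounds kw L col hcol
  rw [grid_get_aux (kw.length : Int) row col hw hb.1 hb.2 t 0 PySem.Dict.empty]
  simp only [zero_add, sub_zero, PySem.Dict.get?_empty]
  by_cases hc : 0 ≤ row * (kw.length : Int) + col ∧ row * (kw.length : Int) + col < (t.length : Int)
  · rw [if_pos hc, if_pos hc]
    simp only [Option.map_some]
    rw [PySem.List.pyGetD_eq_getElem t ' ' hc.1 hc.2, List.getElem?_eq_getElem (by omega)]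
  · rw [if_neg hc, if_neg hc]
    rfl

-- ===== VERDICT (by name: the statement is the Claim_ definition above) =====
theorem myszkowski_encrypt_spec : Claim_equal_myszkowski_encrypt := by
  intro text keyword _hdom hpre
  unfold Spec_myszkowski_encrypt
  have hkw : keyword.toList ≠ [] := by
    intro h
    exact hpre (by simpa using congrArg String.ofList h)
  have hwidth' : PySem.Str.len keyword = (keyword.toList.length : Int) := by simp [pysem]
  have hL : PySem.Str.len text = (text.toList.length : Int) := by simp [pysem]
  have hw : (0 : Int) < (keyword.toList.length : Int) := by
    exact_mod_cast List.length_pos_of_ne_nil hkw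
  simp only [myszkowski_encrypt, myszkowski_encrypt_alt, hwidth', hL]
  refine congrArg String.ofList ?_
  -- A's side: fold → flatMap over letters, rows, columns
  rw [show (fun (acc : List Char) (letter : Char) =>
      (if (((PySem.List.enumerate keyword.toList).foldl
          (fun d p => d.modify p.2 [] (fun l => l ++ [p.1])) PySem.Dict.empty).getD letter []).length == 1 then
        (PySem.List.pyRange 0 (PySem.Int.floordiv ((text.toList.length : Int) + (keyword.toList.length : Int) - 1) (keyword.toList.length : Int)) 1).foldl (fun acc row =>
          match ((PySem.List.enumerate text.toList).foldl
              (fun d p => d.insert (PySem.Int.floordiv p.1 (keyword.toList.length : Int), PySem.Int.mod p.1 (keyword.toList.length : Int)) p.2)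
              PySem.Dict.empty).get? (row, PySem.List.pyGetD (((PySem.List.enumerate keyword.toList).foldl
          (fun d p => d.modify p.2 [] (fun l => l ++ [p.1])) PySem.Dict.empty).getD letter []) 0 0) with
          | some ch => acc ++ [ch]
          | none => acc) acc
      else
        (PySem.List.pyRange 0 (PySem.Int.floordiv ((text.toList.length : Int) + (keyword.toList.length : Int) - 1) (keyword.toList.length : Int)) 1).foldl (fun acc row =>
          (((PySem.List.enumerate keyword.toList).foldl
          (fun d p => d.modify p.2 [] (fun l => l ++ [p.1])) PySem.Dict.empty).getD letter []).foldl (fun acc col =>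
            match ((PySem.List.enumerate text.toList).foldl
              (fun d p => d.insert (PySem.Int.floordiv p.1 (keyword.toList.length : Int), PySem.Int.mod p.1 (keyword.toList.length : Int)) p.2)
              PySem.Dict.empty).get? (row, col) with
            | some ch => acc ++ [ch]
            | none => acc) acc) acc))
      = fun acc letter => acc ++ (PySem.List.pyRange 0 (PySem.Int.floordiv ((text.toList.length : Int) + (keyword.toList.length : Int) - 1) (keyword.toList.length : Int)) 1).flatMap (fun row =>
          (((PySem.List.enumerate keyword.toList).foldl
          (fun d p => d.modify p.2 [] (fun l => l ++ [p.1])) PySem.Dict.empty).getD letter []).flatMap (fun col =>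
            (((PySem.List.enumerate text.toList).foldl
              (fun d p => d.insert (PySem.Int.floordiv p.1 (keyword.toList.length : Int), PySem.Int.mod p.1 (keyword.toList.length : Int)) p.2)
              PySem.Dict.empty).get? (row, col)).toList))
      from funext fun acc => funext fun letter =>
        branch_eq (fun row col => ((PySem.List.enumerate text.toList).foldl
              (fun d p => d.insert (PySem.Int.floordiv p.1 (keyword.toList.length : Int), PySem.Int.mod p.1 (keyword.toList.length : Int)) p.2)
              PySem.Dict.empty).get? (row, col)) _ _ acc]
  rw [PySem.List.foldl_append_eq_flatMap, List.nil_append]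
  -- both sides are now idxList read through the text
  have hA := idxList_map_getter text.toList keyword.toList hw
  unfold lettersOf grpOf nrowsOf at hA
  rw [hA]
  -- B's side: sorted2 → sorted under the lexicographic key → A's reading order
  rw [sorted2_eq_sorted_lex (PySem.List.pyRange 0 (text.toList.length : Int) 1)
    (fun i => PySem.List.pyGetD keyword.toList (PySem.Int.mod i (keyword.toList.length : Int)) ' ')]
  rw [show (fun (i : Int) => toLex (PySem.List.pyGetD keyword.toList (PySem.Int.mod i (keyword.toList.length : Int)) ' ', i)) = lexKey keyword.toList from rfl]
  rw [reading_order text.toList keyword.toList hw]
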